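-- pv_equiv track=rewrite | github.com/Selvam-9/TensorTonic-Solutions | differencing/differencing.py | differencing
-- ===== SOURCE A (Python) =====
-- def differencing(series, order):
--     """
--     Apply d-th order differencing to the time series.
--     DO NOT SORT the series; time order must be preserved.
--     """
--     current_data = list(series)
--
--     for _ in range(order):
--         new_diffs = []
--         # Calculate x[t] - x[t-1] based on current order
--         for i in range(1, len(current_data)):
--             new_diffs.append(current_data[i] - current_data[i-1])
--         current_data = new_diffs
--
--         if not current_data:
--             break
--
--     return current_data
-- ===== SOURCE B (Python) =====
-- def differencing(series, order):
--     """
--     Apply d-th order differencing to the time series.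
--     DO NOT SORT the series; time order must be preserved.
--     """
--     if order <= 0:
--         return list(series)
--     if order >= len(series):
--         return []
--     d = order
--     # Pascal row: coeffs[k] == C(d, k)
--     coeffs = [1]
--     for _ in range(d):
--         coeffs = [a + b for a, b in zip([0] + coeffs, coeffs + [0])]
--     out = []
--     for i in range(len(series) - d):
--         acc = 0
--         for k in range(d + 1):
--             acc += (1 if k % 2 == 0 else -1) * coeffs[k] * series[i + d - k]
--         out.append(acc)
--     return out
-- ===== Notes on version B (the rewrite author's own statement) =====
-- stated objective: alternative
-- what changed: Replaces the repeated successive-difference passes with one convolution pass using the closed-form d-th difference operator: a Pascal row of binomial coefficients is built once, then each output entry is the alternating-sign weighted sum sum_k (-1)^k C(d,k) * series[i+d-k].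
import Mathlib
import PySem

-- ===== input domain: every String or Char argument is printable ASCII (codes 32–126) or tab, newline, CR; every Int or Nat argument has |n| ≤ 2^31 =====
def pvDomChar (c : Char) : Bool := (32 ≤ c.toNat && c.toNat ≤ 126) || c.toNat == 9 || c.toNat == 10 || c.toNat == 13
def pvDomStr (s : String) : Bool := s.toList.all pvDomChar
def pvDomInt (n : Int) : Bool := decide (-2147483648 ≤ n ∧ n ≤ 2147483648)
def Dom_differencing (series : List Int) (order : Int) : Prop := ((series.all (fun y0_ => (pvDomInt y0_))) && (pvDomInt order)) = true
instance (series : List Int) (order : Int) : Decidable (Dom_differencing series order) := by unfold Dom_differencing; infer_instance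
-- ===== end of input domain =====

-- B replaces A's `order` successive-difference passes with one convolution pass using the
-- closed-form d-th difference operator (precomputed Pascal-row binomial coefficients);
-- a different algorithm of the same cost class, not claimed faster.

-- ===== PORT A =====
-- inner loop: for i in range(1, len(current_data)): new_diffs.append(current_data[i] - current_data[i-1]);
-- both indices are always in range, so the total pyGetD form is exact here
def stepA (cur : List Int) : List Int :=
  (PySem.List.pyRange 1 (cur.length : Int) 1).foldl
    (fun acc i => acc ++ [PySem.List.pyGetD cur i 0 - PySem.List.pyGetD cur (i - 1) 0]) []

-- for _ in range(order): … ; if not current_data: break   (range(order) has order.toNat steps)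
def aLoop : Nat → List Int → List Int
  | 0, cur => cur
  | n + 1, cur =>
    let nd := stepA cur
    if nd = [] then nd else aLoop n nd

def differencing (series : List Int) (order : Int) : List Int :=
  aLoop order.toNat series

-- ===== PORT B =====
-- coeffs = [a + b for a, b in zip([0] + coeffs, coeffs + [0])]
def pascalNext (r : List Int) : List Int := List.zipWith (· + ·) (0 :: r) (r ++ [0])

def pascalRow : Nat → List Int
  | 0 => [1]
  | d + 1 => pascalNext (pascalRow d)

-- all list indices (coeffs[k], series[i + d - k]) are nonnegative and in range, so Nat
-- ranges and List.getD are exact ports of Python's range/indexing here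
def differencing_alt (series : List Int) (order : Int) : List Int :=
  if order ≤ 0 then series
  else if (series.length : Int) ≤ order then []
  else
    let d := order.toNat
    let coeffs := pascalRow d
    (List.range (series.length - d)).map (fun i =>
      (List.range (d + 1)).foldl
        (fun acc k =>
          acc + (if k % 2 = 0 then (1 : Int) else -1) * coeffs.getD k 0
              * series.getD (i + d - k) 0) 0)

-- ===== PRECONDITION & SPEC =====
def Spec_differencing (series : List Int) (order : Int) (out : List Int) : Prop := out = differencing_alt series order
instance (series : List Int) (order : Int) (out : List Int) : Decidable (Spec_differencing series order out) := by unfold Spec_differencing; infer_instance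

-- ===== CLAIM (what is proved, stated in full; the proofs are below) =====
def Claim_equal_differencing : Prop := ∀ (series : List Int) (order : Int), Dom_differencing series order → Spec_differencing series order (differencing series order)

-- ===== LEMMAS AND PROOFS =====

-- break-free reference iteration of A's pass
def iterNB : Nat → List Int → List Int
  | 0, cur => cur
  | n + 1, cur => iterNB n (stepA cur)

-- the closed-form value of output entry i after d passes
def diffVal (d : Nat) (xs : List Int) (i : Nat) : Int :=
  ∑ k ∈ Finset.range (d + 1), (-1 : Int) ^ k * (Nat.choose d k : Int) * xs.getD (i + d - k) 0

theorem stepA_eq (cur : List Int) :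
    stepA cur = (List.range (cur.length - 1)).map (fun j => cur.getD (j + 1) 0 - cur.getD j 0) := by
  unfold stepA
  rw [PySem.List.foldl_append_singleton_eq_map, PySem.List.pyRange_one, List.map_map,
    List.nil_append]
  have h : ((cur.length : Int) - 1).toNat = cur.length - 1 := by omega
  rw [h]
  refine List.map_congr_left ?_
  intro k hk
  have h1 : (1 : Int) + k = ((k + 1 : Nat) : Int) := by push_cast; ring
  simp only [Function.comp, h1, PySem.List.pyGetD_natCast]
  have h2 : ((k + 1 : Nat) : Int) - 1 = ((k : Nat) : Int) := by push_cast; ring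
  rw [h2, PySem.List.pyGetD_natCast]

theorem stepA_nil : stepA [] = [] := by decide

theorem iterNB_nil (n : Nat) : iterNB n [] = [] := by
  induction n with
  | zero => rfl
  | succ n ih => simp [iterNB, stepA_nil, ih]

-- the break only skips passes that would keep the list empty anyway
theorem aLoop_eq_iterNB (n : Nat) (cur : List Int) : aLoop n cur = iterNB n cur := by
  induction n generalizing cur with
  | zero => rfl
  | succ n ih =>
    simp only [aLoop, iterNB]
    by_cases h : stepA cur = []
    · rw [if_pos h, h, iterNB_nil]
    · rw [if_neg h, ih]

-- Pascal's rule, in the form that advances the alternating difference sum by one order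
theorem pascal_sum (f : Nat → Int) (d : Nat) :
    (∑ k ∈ Finset.range (d + 1),
        (-1 : Int) ^ k * (Nat.choose d k : Int) * (f (d - k + 1) - f (d - k)))
      = ∑ k ∈ Finset.range (d + 2), (-1 : Int) ^ k * (Nat.choose (d + 1) k : Int) * f (d + 1 - k) := by
  have hRHS : (∑ k ∈ Finset.range (d + 2), (-1 : Int) ^ k * (Nat.choose (d + 1) k : Int) * f (d + 1 - k))
      = (∑ j ∈ Finset.range (d + 1), (-1 : Int) ^ (j + 1) * (Nat.choose (d + 1) (j + 1) : Int) * f (d - j)) + f (d + 1) := by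
    rw [Finset.sum_range_succ']
    congr 1
    · apply Finset.sum_congr rfl
      intro j hj
      have h : d + 1 - (j + 1) = d - j := by omega
      rw [h]
    · simp
  have hL : (∑ k ∈ Finset.range (d + 1),
        (-1 : Int) ^ k * (Nat.choose d k : Int) * (f (d - k + 1) - f (d - k)))
      = (∑ k ∈ Finset.range (d + 1), (-1 : Int) ^ k * (Nat.choose d k : Int) * f (d - k + 1))
        - ∑ k ∈ Finset.range (d + 1), (-1 : Int) ^ k * (Nat.choose d k : Int) * f (d - k) := by
    rw [← Finset.sum_sub_distrib]
    apply Finset.sum_congr rfl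
    intro k _
    ring
  have hS1 : (∑ k ∈ Finset.range (d + 1), (-1 : Int) ^ k * (Nat.choose d k : Int) * f (d - k + 1))
      = (∑ j ∈ Finset.range (d + 1), (-1 : Int) ^ (j + 1) * (Nat.choose d (j + 1) : Int) * f (d - j)) + f (d + 1) := by
    rw [Finset.sum_range_succ']
    congr 1
    · rw [Finset.sum_range_succ]
      have hz : (Nat.choose d (d + 1) : Int) = 0 := by
        simp
      rw [hz, mul_zero, zero_mul, add_zero]
      apply Finset.sum_congr rfl
      intro j hj
      have h : d - (j + 1) + 1 = d - j := by
        have := Finset.mem_range.mp hj; omega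
      rw [h]
    · simp
  rw [hRHS, hL, hS1]
  have hmerge : ∀ j ∈ Finset.range (d + 1),
      (-1 : Int) ^ (j + 1) * (Nat.choose (d + 1) (j + 1) : Int) * f (d - j)
        = (-1 : Int) ^ (j + 1) * (Nat.choose d (j + 1) : Int) * f (d - j)
          - (-1 : Int) ^ j * (Nat.choose d j : Int) * f (d - j) := by
    intro j _
    rw [Nat.choose_succ_succ]
    push_cast
    ring
  rw [Finset.sum_congr rfl hmerge, Finset.sum_sub_distrib]
  ring

-- d passes of A's successive differencing equal the closed-form alternating binomial sum
theorem iterNB_eq (d : Nat) (xs : List Int) :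
    iterNB d xs = (List.range (xs.length - d)).map (fun i => diffVal d xs i) := by
  induction d generalizing xs with
  | zero =>
    show xs = _
    apply List.ext_getElem
    · simp
    · intro i h1 h2
      simp only [List.getElem_map, List.getElem_range]
      simp only [diffVal]
      simp at h1
      simp [List.getD_eq_getElem?_getD, List.getElem?_eq_getElem h1]
  | succ d ih =>
    show iterNB d (stepA xs) = _
    rw [ih (stepA xs)]
    have hlen : (stepA xs).length = xs.length - 1 := by
      rw [stepA_eq]; simp
    have hlen2 : (stepA xs).length - d = xs.length - (d + 1) := by omega
    rw [hlen2]
    apply List.map_congr_left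
    intro i hi
    have hi' : i < xs.length - (d + 1) := List.mem_range.mp hi
    show diffVal d (stepA xs) i = diffVal (d + 1) xs i
    unfold diffVal
    have hR : (∑ k ∈ Finset.range (d + 1 + 1),
        (-1 : Int) ^ k * (Nat.choose (d + 1) k : Int) * xs.getD (i + (d + 1) - k) 0)
        = ∑ k ∈ Finset.range (d + 2),
            (-1 : Int) ^ k * (Nat.choose (d + 1) k : Int) * xs.getD (i + (d + 1 - k)) 0 := by
      apply Finset.sum_congr rfl
      intro k hk
      have hk2 : k ≤ d + 1 := by have := Finset.mem_range.mp hk; omega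
      have e : i + (d + 1) - k = i + (d + 1 - k) := by omega
      rw [e]
    rw [hR, ← pascal_sum (fun j => xs.getD (i + j) 0) d]
    apply Finset.sum_congr rfl
    intro k hk
    have hk' : k ≤ d := by have := Finset.mem_range.mp hk; omega
    have h1 : (stepA xs).getD (i + d - k) 0
        = xs.getD (i + d - k + 1) 0 - xs.getD (i + d - k) 0 := by
      rw [stepA_eq]
      exact PySem.List.getD_map_range _ _ _ _ (by omega)
    rw [h1]
    have e1 : i + d - k + 1 = i + (d - k + 1) := by omega
    have e2 : i + d - k = i + (d - k) := by omega
    rw [e1, e2]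

-- B's Pascal-triangle row really holds the binomial coefficients
theorem pascalRow_eq (d : Nat) :
    pascalRow d = (List.range (d + 1)).map (fun k => (Nat.choose d k : Int)) := by
  induction d with
  | zero => decide
  | succ d ih =>
    show pascalNext (pascalRow d) = _
    rw [ih]
    unfold pascalNext
    apply List.ext_getElem
    · simp
    · intro k h1 h2
      simp only [List.getElem_zipWith]
      simp only [List.length_zipWith, List.length_cons, List.length_append, List.length_map,
        List.length_range] at h1
      have hk : k < d + 2 := by omega
      simp only [List.getElem_map, List.getElem_range]
      match k with
      | 0 =>
        have h0 : 0 < d + 1 := by omega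
        rw [List.getElem_cons_zero, List.getElem_append_left (by simp)]
        simp
      | j + 1 =>
        rw [List.getElem_cons_succ, List.getElem_map, List.getElem_range]
        by_cases hj : j + 1 < d + 1
        · rw [List.getElem_append_left (by simpa using hj)]
          simp only [List.getElem_map, List.getElem_range]
          rw [Nat.choose_succ_succ]
          push_cast; ring
        · rw [List.getElem_append_right (by simp; omega)]
          simp only [List.length_map, List.length_range]
          rw [Nat.choose_succ_succ]
          push_cast
          simp [Nat.choose_eq_zero_of_lt (show d < j + 1 by omega)]

theorem sum_map_range (g : Nat → Int) (n : Nat) :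
    ((List.range n).map g).sum = ∑ k ∈ Finset.range n, g k := by
  induction n with
  | zero => simp
  | succ n ih =>
    rw [List.range_succ, Finset.sum_range_succ, List.map_append, List.sum_append, ih]
    simp

theorem sign_eq_pow (k : Nat) : (if k % 2 = 0 then (1 : Int) else -1) = (-1 : Int) ^ k := by
  rcases Nat.even_or_odd k with h | h
  · rw [if_pos (Nat.even_iff.mp h), h.neg_one_pow]
  · rw [if_neg (by simpa [Nat.odd_iff] using h), h.neg_one_pow]

-- ===== VERDICT (by name: the statement is the Claim_ definition above) =====
theorem differencing_spec : Claim_equal_differencing := by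
  intro series order _
  show differencing series order = differencing_alt series order
  unfold differencing differencing_alt
  by_cases h : order ≤ 0
  · rw [if_pos h]
    have h0 : order.toNat = 0 := by omega
    rw [h0]
    rfl
  · rw [if_neg h]
    by_cases h2 : (series.length : Int) ≤ order
    · rw [if_pos h2, aLoop_eq_iterNB, iterNB_eq]
      have hz : series.length - order.toNat = 0 := by omega
      rw [hz, List.range_zero, List.map_nil]
    rw [if_neg h2]
    rw [aLoop_eq_iterNB, iterNB_eq]
    apply List.map_congr_left
    intro i _
    rw [PySem.List.foldl_add, sum_map_range, zero_add]
    unfold diffVal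
    apply Finset.sum_congr rfl
    intro k hk
    have hk' : k < order.toNat + 1 := Finset.mem_range.mp hk
    rw [sign_eq_pow, pascalRow_eq, PySem.List.getD_map_range _ _ _ _ hk']
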